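-- pv_equiv track=rewrite | github.com/NicolasOng/gerbil_connects | empirical_errors/empirical_errors.py | first_close_span
-- ===== SOURCE A (Python) =====
-- def first_close_span(span, span_list):
--     '''
--     gets the index of first span in the list with an equal or above starting value.
--     '''
--     span_list.sort(key=lambda span: span['start'])
--     index = -1
--     for i, lspan in enumerate(span_list):
--         if lspan['start'] >= span['start']:
--             index = i
--             break
--     return index
-- ===== SOURCE B (Python) =====
-- def first_close_span(span, span_list):
--     '''
--     gets the index of first span in the list with an equal or above starting value.
--     '''
--     span_list.sort(key=lambda s: s['start'])
--     target = span['start']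
--     lo, hi = 0, len(span_list)
--     while lo < hi:
--         mid = (lo + hi) // 2
--         if span_list[mid]['start'] < target:
--             lo = mid + 1
--         else:
--             hi = mid
--     return lo if lo < len(span_list) else -1
-- ===== Notes on version B (the rewrite author's own statement) =====
-- stated objective: alternative
-- what changed: After the same in-place sort, B replaces A's linear scan with a hand-written binary search (bisect_left) over the sorted start values; the scan disappears.
-- outside the precondition, e.g. on first_close_span({}, []): A returns -1, B raises KeyError
import Mathlib
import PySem

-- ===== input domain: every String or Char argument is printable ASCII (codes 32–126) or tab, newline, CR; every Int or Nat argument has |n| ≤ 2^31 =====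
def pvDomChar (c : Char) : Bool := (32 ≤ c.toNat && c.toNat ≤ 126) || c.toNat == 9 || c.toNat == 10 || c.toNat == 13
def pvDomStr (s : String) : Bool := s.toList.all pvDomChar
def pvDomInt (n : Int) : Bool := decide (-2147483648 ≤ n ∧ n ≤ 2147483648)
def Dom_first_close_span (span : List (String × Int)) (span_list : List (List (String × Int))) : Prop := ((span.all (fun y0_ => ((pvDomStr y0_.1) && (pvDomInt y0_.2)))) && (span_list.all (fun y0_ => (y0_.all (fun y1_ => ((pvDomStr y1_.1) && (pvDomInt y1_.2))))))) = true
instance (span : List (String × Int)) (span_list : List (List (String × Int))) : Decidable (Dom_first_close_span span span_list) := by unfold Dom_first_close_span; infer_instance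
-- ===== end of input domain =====

-- B replaces A's post-sort linear scan by a hand-written binary search (bisect_left) over the sorted
-- start values; equal cost class (the sort dominates). Both versions sort span_list IN PLACE exactly
-- like A; the equivalence proved here is about the return value.

-- ===== PORT A =====
-- d['start'] : first match in the association list; under Pre_ the key is present, so the default is never used
def pvGetStart (d : List (String × Int)) : Int := (d.lookup "start").getD 0

-- the 'for i, lspan in enumerate(...)' loop with its break
def pvScan (t : Int) : List (Int × List (String × Int)) → Int
  | [] => -1
  | (i, lspan) :: rest => if pvGetStart lspan ≥ t then i else pvScan t rest

def first_close_span (span : List (String × Int)) (span_list : List (List (String × Int))) : Int :=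
  let sl := PySem.List.sorted span_list pvGetStart false
  pvScan (pvGetStart span) (PySem.List.enumerate sl 0)

-- ===== PORT B =====
-- the 'while lo < hi' binary-search loop of Source B; Nat '/' 2 is exact for Python's '//' on nonnegatives.
-- The fuel argument only makes the loop total: hi - lo shrinks at every step, so fuel = initial hi - lo suffices
def pvBisect (sl : List (List (String × Int))) (t : Int) : Nat → Nat → Nat → Nat
  | 0, lo, _ => lo
  | fuel + 1, lo, hi =>
    if lo < hi then
      let mid := (lo + hi) / 2
      if pvGetStart (PySem.List.pyGetD sl (mid : Int) []) < t then pvBisect sl t fuel (mid + 1) hi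
      else pvBisect sl t fuel lo mid
    else lo

def first_close_span_alt (span : List (String × Int)) (span_list : List (List (String × Int))) : Int :=
  let sl := PySem.List.sorted span_list pvGetStart false
  let t := pvGetStart span
  let lo := pvBisect sl t sl.length 0 sl.length
  if lo < sl.length then (lo : Int) else -1

-- ===== PRECONDITION & SPEC =====
-- Pre_ requires the 'start' key in span and in every element of span_list (the natural domain: these are
-- spans). It excludes inputs where A raises KeyError (a list element without 'start'; span without 'start'
-- with nonempty span_list), and also the corner where span lacks 'start' but span_list is empty: there A
-- never consults span and returns -1, while B always looks up span['start'] and raises.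
def Pre_first_close_span (span : List (String × Int)) (span_list : List (List (String × Int))) : Prop :=
  ((span.any (fun p => p.1 == "start")) && (span_list.all (fun d => d.any (fun p => p.1 == "start")))) = true
instance (span : List (String × Int)) (span_list : List (List (String × Int))) : Decidable (Pre_first_close_span span span_list) := by unfold Pre_first_close_span; infer_instance

def pvWitness_first_close_span : (List (String × Int)) × (List (List (String × Int))) :=
  ([("start", 3)], [[("start", 5)], [("start", 1)]])

def Spec_first_close_span (span : List (String × Int)) (span_list : List (List (String × Int))) (out : Int) : Prop := out = first_close_span_alt span span_list
instance (span : List (String × Int)) (span_list : List (List (String × Int))) (out : Int) : Decidable (Spec_first_close_span span span_list out) := by unfold Spec_first_close_span; infer_instance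

-- ===== CLAIM (what is proved, stated in full; the proofs are below) =====
def Claim_equal_first_close_span : Prop := ∀ (span : List (String × Int)) (span_list : List (List (String × Int))), Dom_first_close_span span span_list → Pre_first_close_span span span_list → Spec_first_close_span span span_list (first_close_span span span_list)

-- ===== LEMMAS AND PROOFS =====

-- 'i is the bisect_left insertion point for t in sl (by start value)'
def InsAt (sl : List (List (String × Int))) (t : Int) (i : Nat) : Prop :=
  i ≤ sl.length ∧ (∀ j (_ : j < sl.length), j < i → pvGetStart sl[j] < t) ∧
    (∀ j (_ : j < sl.length), i ≤ j → t ≤ pvGetStart sl[j])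

theorem pvBisect_insAt (sl : List (List (String × Int))) (t : Int)
    (hpw : sl.Pairwise (fun a b => pvGetStart a ≤ pvGetStart b)) :
    ∀ n lo hi, hi - lo ≤ n → lo ≤ hi → hi ≤ sl.length →
      (∀ j (_ : j < sl.length), j < lo → pvGetStart sl[j] < t) →
      (∀ j (_ : j < sl.length), hi ≤ j → t ≤ pvGetStart sl[j]) →
      InsAt sl t (pvBisect sl t n lo hi) := by
  have hmono : ∀ j m (hj : j < sl.length) (hm : m < sl.length), j ≤ m →
      pvGetStart sl[j] ≤ pvGetStart sl[m] := by
    intro j m hj hm hjm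
    rcases Nat.lt_or_eq_of_le hjm with h | h
    · exact (List.pairwise_iff_getElem.mp hpw) j m hj hm h
    · subst h; exact le_refl _
  intro n
  induction n with
  | zero =>
    intro lo hi hn hlo hhi hbelow habove
    have : lo = hi := by omega
    subst this
    simp only [pvBisect]
    exact ⟨by omega, hbelow, fun j hj hle => habove j hj hle⟩
  | succ n ih =>
    intro lo hi hn hlo hhi hbelow habove
    simp only [pvBisect]
    by_cases h : lo < hi
    · simp only [h, if_true]
      have hmidlt : (lo + hi) / 2 < hi := by omega
      have hmidge : lo ≤ (lo + hi) / 2 := by omega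
      have hmlen : (lo + hi) / 2 < sl.length := by omega
      rw [PySem.List.pyGetD_natCast, List.getD_eq_getElem sl [] hmlen]
      by_cases hc : pvGetStart sl[(lo + hi) / 2] < t
      · simp only [hc, if_true]
        apply ih ((lo + hi) / 2 + 1) hi (by omega) (by omega) hhi
        · intro j hj hjlt
          exact lt_of_le_of_lt (hmono j ((lo + hi) / 2) hj hmlen (by omega)) hc
        · exact habove
      · simp only [hc, if_false]
        apply ih lo ((lo + hi) / 2) (by omega) (by omega) (by omega) hbelow
        intro j hj hle
        exact le_trans (le_of_not_gt hc) (hmono ((lo + hi) / 2) j hmlen hj hle)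
    · simp only [h, if_false]
      have : lo = hi := by omega
      subst this
      exact ⟨by omega, hbelow, fun j hj hle => habove j hj hle⟩

theorem pvScan_eq_of_insAt (t : Int) :
    ∀ (l : List (List (String × Int))) (s i : Nat),
      l.Pairwise (fun a b => pvGetStart a ≤ pvGetStart b) →
      InsAt l t i →
      pvScan t (PySem.List.enumerate l (s : Int)) = if i < l.length then ((s + i : Nat) : Int) else -1 := by
  intro l
  induction l with
  | nil =>
    intro s i _ hins
    have : i = 0 := by
      have := hins.1; simpa using this
    subst this
    simp [PySem.List.enumerate, pvScan]
  | cons d rest ih =>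
    intro s i hpw hins
    obtain ⟨hle, hlt, hge⟩ := hins
    have henum : PySem.List.enumerate (d :: rest) (s : Int) = ((s : Int), d) :: PySem.List.enumerate rest ((s + 1 : Nat) : Int) := by
      push_cast
      simp [PySem.List.enumerate]
    rw [henum]
    by_cases hc : pvGetStart d ≥ t
    · -- break at the head: insertion point must be 0
      have hi0 : i = 0 := by
        by_contra hne
        have h0 : (0 : Nat) < (d :: rest).length := by simp
        have := hlt 0 h0 (by omega)
        simp at this
        omega
      subst hi0
      simp [pvScan, hc]
    · -- head is below t: insertion point is positive
      have hipos : 0 < i := by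
        by_contra hne
        have h0 : (0 : Nat) < (d :: rest).length := by simp
        have := hge 0 h0 (by omega)
        simp at this
        omega
      obtain ⟨i', rfl⟩ : ∃ i', i = i' + 1 := ⟨i - 1, by omega⟩
      have hins' : InsAt rest t i' := by
        refine ⟨by simpa using hle, ?_, ?_⟩
        · intro j hj hjlt
          have := hlt (j + 1) (by simpa using Nat.succ_lt_succ hj) (by omega)
          simpa using this
        · intro j hj hjle
          have := hge (j + 1) (by simpa using Nat.succ_lt_succ hj) (by omega)
          simpa using this
      have := ih (s + 1) i' (List.Pairwise.sublist (List.sublist_cons_self d rest) hpw) hins'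
      simp only [pvScan, hc, if_false]
      rw [this]
      by_cases hlen : i' < rest.length
      · have : i' + 1 < (d :: rest).length := by simpa using Nat.succ_lt_succ hlen
        simp [hlen, Nat.add_comm, Nat.add_left_comm]
      · have h2 : ¬ (i' + 1 < (d :: rest).length) := by simp; omega
        simp [hlen]

-- ===== VERDICT (by name: the statement is the Claim_ definition above) =====
theorem first_close_span_spec : Claim_equal_first_close_span := by
  intro span span_list _hdom _hpre
  unfold Spec_first_close_span first_close_span first_close_span_alt
  set sl := PySem.List.sorted span_list pvGetStart false with hsl
  have hpw : sl.Pairwise (fun a b => pvGetStart a ≤ pvGetStart b) :=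
    PySem.List.sorted_pairwise span_list pvGetStart
  have hins : InsAt sl (pvGetStart span) (pvBisect sl (pvGetStart span) sl.length 0 sl.length) :=
    pvBisect_insAt sl (pvGetStart span) hpw sl.length 0 sl.length (by omega) (by omega) (le_refl _)
      (by intro j hj hlt; omega) (by intro j hj hle; omega)
  have h := pvScan_eq_of_insAt (pvGetStart span) sl 0 (pvBisect sl (pvGetStart span) sl.length 0 sl.length) hpw hins
  simp only [Nat.cast_zero, Nat.zero_add] at h
  simpa using h
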